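-- pv_equiv track=rewrite | github.com/B-Singularity/algo_study | 6th_week/swea_1244.py | recur
-- ===== SOURCE A (Python) =====
-- def recur(arr, cnt, N, visited, max_value):
--     current_value = int(''.join(map(str, arr)))
--
--     if (current_value, cnt) in visited:
--         return max_value
--     visited.add((current_value, cnt))
--
--     if cnt == N:
--         return max(max_value, current_value)
--
--     for i in range(len(arr) - 1):
--         for j in range(i + 1, len(arr)):
--             arr[i], arr[j] = arr[j], arr[i]
--             max_value = recur(arr, cnt + 1, N, visited, max_value)
--             arr[i], arr[j] = arr[j], arr[i]
--
--     return max_value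
-- ===== SOURCE B (Python) =====
-- def recur(arr, cnt, N, visited, max_value):
--     # Iterative re-implementation: explicit LIFO worklist instead of recursion.
--     # Same visited pruning, same visit order (children pushed reversed), same result.
--     stack = [(list(arr), cnt)]
--     while stack:
--         cur, c = stack.pop()
--         current_value = int(''.join(map(str, cur)))
--         if (current_value, c) in visited:
--             continue
--         visited.add((current_value, c))
--         if c == N:
--             if current_value > max_value:
--                 max_value = current_value
--             continue
--         succs = []
--         for i in range(len(cur) - 1):
--             for j in range(i + 1, len(cur)):
--                 nxt = list(cur)
--                 nxt[i], nxt[j] = nxt[j], nxt[i]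
--                 succs.append((nxt, c + 1))
--         stack.extend(reversed(succs))
--     return max_value
-- ===== Notes on version B (the rewrite author's own statement) =====
-- stated objective: alternative
-- what changed: Replaces A's recursion (with in-place swap/undo on arr) by an iterative LIFO worklist of (digit-list, cnt) states that pushes freshly-copied swapped successors and folds finished values into a running max; same visited pruning and same visit order, so the same result and the same final visited set.
-- outside the precondition, e.g. on recur([1, 1], 0, 950, set(), 0): A returns 11, B returns 11; on recur([-1, 2], 0, 1, {(-12, 0)}, 7): A returns 7, B returns 7; on recur([-1, 2], 0, 1, set(), 0): A raises ValueError, B raises ValueError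
import Mathlib
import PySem

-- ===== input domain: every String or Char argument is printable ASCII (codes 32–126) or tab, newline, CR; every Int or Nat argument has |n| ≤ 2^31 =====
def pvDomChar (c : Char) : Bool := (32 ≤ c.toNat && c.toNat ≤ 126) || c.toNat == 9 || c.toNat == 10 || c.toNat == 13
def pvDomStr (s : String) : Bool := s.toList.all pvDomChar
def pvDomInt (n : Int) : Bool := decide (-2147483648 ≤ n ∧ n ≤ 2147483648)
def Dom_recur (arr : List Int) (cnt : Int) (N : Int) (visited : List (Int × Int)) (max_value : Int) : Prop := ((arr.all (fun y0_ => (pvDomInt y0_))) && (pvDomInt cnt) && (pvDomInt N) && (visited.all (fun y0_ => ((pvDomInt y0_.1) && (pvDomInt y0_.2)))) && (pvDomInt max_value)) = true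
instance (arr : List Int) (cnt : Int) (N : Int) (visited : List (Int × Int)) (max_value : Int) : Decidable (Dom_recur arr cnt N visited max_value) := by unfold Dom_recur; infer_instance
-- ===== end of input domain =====

-- B replaces A's recursion by an explicit LIFO stack of (digits, cnt) states (same visited
-- pruning, same visit order); equivalence is about the RETURN value — both Pythons also extend
-- the caller's `visited` set identically, and neither leaves `arr` mutated.

-- ===== PORT A =====
-- int(''.join(map(str, arr))) ; none = ValueError
def pvJoinVal (arr : List Int) : Option Int :=
  PySem.Int.ofStr? (PySem.Str.join "" (arr.map PySem.Int.toStr))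

-- arr[i], arr[j] = arr[j], arr[i]  (i, j produced by range(), always in bounds and ≥ 0)
def pvSwap (arr : List Int) (i j : Int) : List Int :=
  (arr.set i.toNat (PySem.List.pyGetD arr j 0)).set j.toNat (PySem.List.pyGetD arr i 0)

-- A's recursion; `visited`/`max_value` are threaded because Python mutates the set in place.
-- `fuel` only makes the def total: inside Pre_ it is (N-cnt).toNat and the 0-branch with
-- cnt ≠ N is reached only when there are no pairs to swap (len(arr) ≤ 1), where the loop is empty anyway.
def recurA (fuel : Nat) (arr : List Int) (cnt : Int) (N : Int) (visited : List (Int × Int)) (max_value : Int) : (List (Int × Int)) × Int :=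
  match pvJoinVal arr with
  | none => (visited, max_value)      -- Python raises ValueError here (excluded by Pre_)
  | some current_value =>
    if (current_value, cnt) ∈ visited then (visited, max_value)
    else
      let visited' := PySem.Set.add visited (current_value, cnt)
      if cnt = N then (visited', max max_value current_value)
      else
        match fuel with
        | 0 => (visited', max_value)
        | f + 1 =>
          (PySem.List.pyRange 0 ((arr.length : Int) - 1) 1).foldl
            (fun st i =>
              (PySem.List.pyRange (i + 1) (arr.length : Int) 1).foldl
                (fun st j => recurA f (pvSwap arr i j) (cnt + 1) N st.1 st.2) st)
            (visited', max_value)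

def recur (arr : List Int) (cnt : Int) (N : Int) (visited : List (Int × Int)) (max_value : Int) : Int :=
  (recurA (N - cnt).toNat arr cnt N visited max_value).2

-- ===== PORT B =====
-- the succs list B builds with its two nested loops (fresh copies of cur, swapped)
def pvSuccs (cur : List Int) (c : Int) : List (List Int × Int) :=
  (PySem.List.pyRange 0 ((cur.length : Int) - 1) 1).foldl
    (fun acc i =>
      (PySem.List.pyRange (i + 1) (cur.length : Int) 1).foldl
        (fun acc j => acc ++ [(pvSwap cur i j, c + 1)]) acc) []

-- all (i, j) pairs, flattened (proof-side view of the nested ranges; also sizes B's fuel)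
def pvPairs (l : Int) : List (Int × Int) :=
  (PySem.List.pyRange 0 (l - 1) 1).flatMap
    (fun i => (PySem.List.pyRange (i + 1) l 1).map (fun j => (i, j)))

-- B's while-loop over the stack; head of the list = top of the stack (Python pops from the
-- end after extend(reversed(succs)), which visits succs in order — same thing).
-- `fuel` only makes the loop total; recur_alt passes enough for every input inside Pre_.
def recurB : Nat → Int → List (List Int × Int) → List (Int × Int) → Int → Int
  | 0, _, _, _, max_value => max_value
  | _ + 1, _, [], _, max_value => max_value
  | f + 1, N, (cur, c) :: rest, visited, max_value =>
    match pvJoinVal cur with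
    | none => recurB f N rest visited max_value   -- Python raises ValueError here (excluded by Pre_)
    | some current_value =>
      if (current_value, c) ∈ visited then recurB f N rest visited max_value
      else
        let visited' := PySem.Set.add visited (current_value, c)
        if c = N then recurB f N rest visited' (max max_value current_value)
        else recurB f N (pvSuccs cur c ++ rest) visited' max_value

-- fuel: enough worklist pops for every input inside Pre_ (one pop when there are no pairs
-- to swap; otherwise a bound on the size of the pruned search tree)
def recur_alt (arr : List Int) (cnt : Int) (N : Int) (visited : List (Int × Int)) (max_value : Int) : Int :=
  recurB
    (if (pvPairs (arr.length : Int)).length = 0 then 1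
     else ((pvPairs (arr.length : Int)).length + 1) ^ ((N - cnt).toNat + 1)) N
    [(arr, cnt)] visited max_value

-- ===== PRECONDITION & SPEC =====
-- Pre_ admits the inputs on which Python A returns: a nonempty arr whose tail is nonnegative
-- (so int(''.join(...)) never sees a '-' mid-string), and either cnt == N or a single element
-- (no swaps happen) or cnt < N with every element nonnegative (every joined string parses).
-- It excludes inputs on which A RAISES: empty arr and mid-negative arr (ValueError), cnt > N
-- with ≥ 2 elements (unbounded recursion, RecursionError), and — when ≥ 2 elements and
-- cnt < N — deep searches, where A's recursion depth is N - cnt + 1 and Python's default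
-- recursion limit makes A raise RecursionError (at depth ≈ 995 here); the bound 900 keeps a
-- conservative margin because the exact limit depends on the interpreter's stack state, so a
-- thin band of deep-but-returning inputs is excluded too (cited in the claim).  Also excluded:
-- the rare negative-element inputs rescued only because the joined value happens to be in
-- visited — there A returns max_value (B does too), but that condition is A's own computation,
-- not a closed-form shape of the input.
def Pre_recur (arr : List Int) (cnt : Int) (N : Int) (visited : List (Int × Int)) (max_value : Int) : Prop :=
  arr ≠ [] ∧ (∀ x ∈ arr.tail, 0 ≤ x) ∧
    (cnt = N ∨ arr.length = 1 ∨ (cnt < N ∧ ∀ x ∈ arr, 0 ≤ x)) ∧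
    (arr.length ≤ 1 ∨ N - cnt ≤ 900)
instance (arr : List Int) (cnt : Int) (N : Int) (visited : List (Int × Int)) (max_value : Int) : Decidable (Pre_recur arr cnt N visited max_value) := by unfold Pre_recur; infer_instance

def pvWitness_recur : List Int × Int × Int × (List (Int × Int)) × Int := ([2, 1, 3], 0, 1, [], 0)

def Spec_recur (arr : List Int) (cnt : Int) (N : Int) (visited : List (Int × Int)) (max_value : Int) (out : Int) : Prop := out = recur_alt arr cnt N visited max_value
instance (arr : List Int) (cnt : Int) (N : Int) (visited : List (Int × Int)) (max_value : Int) (out : Int) : Decidable (Spec_recur arr cnt N visited max_value out) := by unfold Spec_recur; infer_instance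

-- ===== CLAIM (what is proved, stated in full; the proofs are below) =====
def Claim_equal_recur : Prop := ∀ (arr : List Int) (cnt : Int) (N : Int) (visited : List (Int × Int)) (max_value : Int), Dom_recur arr cnt N visited max_value → Pre_recur arr cnt N visited max_value → Spec_recur arr cnt N visited max_value (recur arr cnt N visited max_value)

-- ===== LEMMAS AND PROOFS =====

theorem pv_foldl_flatMap {α β σ : Type} (g : α → List β) (f : σ → β → σ) :
    ∀ (l : List α) (init : σ),
      (l.flatMap g).foldl f init = l.foldl (fun st a => (g a).foldl f st) init := by
  intro l
  induction l with
  | nil => intro init; rfl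
  | cons a tl ih => intro init; simp [List.flatMap_cons, List.foldl_append, ih]

theorem pvSwap_length (arr : List Int) (i j : Int) : (pvSwap arr i j).length = arr.length := by
  simp [pvSwap]

theorem pvPairs_nil (l : Int) (h : l ≤ 1) : pvPairs l = [] := by
  unfold pvPairs
  rw [PySem.List.pyRange_one_eq_nil (by omega)]
  rfl

-- A's nested loop is the fold of the child step over the flattened pair list
theorem recurA_loop_eq (f : Nat) (arr : List Int) (cnt : Int) (N : Int) (st : (List (Int × Int)) × Int) :
    (PySem.List.pyRange 0 ((arr.length : Int) - 1) 1).foldl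
        (fun st i =>
          (PySem.List.pyRange (i + 1) (arr.length : Int) 1).foldl
            (fun st j => recurA f (pvSwap arr i j) (cnt + 1) N st.1 st.2) st) st
      = (pvPairs (arr.length : Int)).foldl
          (fun st ij => recurA f (pvSwap arr ij.1 ij.2) (cnt + 1) N st.1 st.2) st := by
  unfold pvPairs
  rw [pv_foldl_flatMap]
  simp [List.foldl_map]

-- B's succs builder produces exactly the mapped pair list
theorem pvSuccs_eq (cur : List Int) (c : Int) :
    pvSuccs cur c
      = (pvPairs (cur.length : Int)).map (fun ij => (pvSwap cur ij.1 ij.2, c + 1)) := by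
  unfold pvSuccs pvPairs
  have h : ∀ (i : Int) (acc : List (List Int × Int)),
      (PySem.List.pyRange (i + 1) (cur.length : Int) 1).foldl
          (fun acc j => acc ++ [(pvSwap cur i j, c + 1)]) acc
        = acc ++ ((PySem.List.pyRange (i + 1) (cur.length : Int) 1).map
            (fun j => (pvSwap cur i j, c + 1))) := by
    intro i acc
    exact PySem.List.foldl_append_singleton_eq_map _ _ _
  simp only [h]
  rw [PySem.List.foldl_append_eq_flatMap]
  simp [List.map_flatMap, Function.comp_def]

theorem recurB_nil (f : Nat) (N : Int) (v : List (Int × Int)) (m : Int) :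
    recurB f N [] v m = m := by
  cases f <;> rfl

-- step lemmas for one unfolding of each port (the matches reduce once the case is fixed)

theorem recurA_none (fuel : Nat) (arr : List Int) (cnt N : Int) (v : List (Int × Int)) (m : Int)
    (hpv : pvJoinVal arr = none) : recurA fuel arr cnt N v m = (v, m) := by
  rw [recurA.eq_def, hpv]

theorem recurA_mem (fuel : Nat) (arr : List Int) (cnt N : Int) (v : List (Int × Int)) (m : Int)
    (cv : Int) (hpv : pvJoinVal arr = some cv) (hmem : (cv, cnt) ∈ v) :
    recurA fuel arr cnt N v m = (v, m) := by
  rw [recurA.eq_def, hpv]; simp [hmem]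

theorem recurA_hit (fuel : Nat) (arr : List Int) (cnt N : Int) (v : List (Int × Int)) (m : Int)
    (cv : Int) (hpv : pvJoinVal arr = some cv) (hmem : (cv, cnt) ∉ v) (hc : cnt = N) :
    recurA fuel arr cnt N v m = (PySem.Set.add v (cv, cnt), max m cv) := by
  subst hc; rw [recurA.eq_def, hpv]; simp [hmem]

theorem recurA_zero (arr : List Int) (cnt N : Int) (v : List (Int × Int)) (m : Int)
    (cv : Int) (hpv : pvJoinVal arr = some cv) (hmem : (cv, cnt) ∉ v) (hc : cnt ≠ N) :
    recurA 0 arr cnt N v m = (PySem.Set.add v (cv, cnt), m) := by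
  rw [recurA.eq_def, hpv]; simp [hmem, hc]

theorem recurA_succ (f : Nat) (arr : List Int) (cnt N : Int) (v : List (Int × Int)) (m : Int)
    (cv : Int) (hpv : pvJoinVal arr = some cv) (hmem : (cv, cnt) ∉ v) (hc : cnt ≠ N) :
    recurA (f + 1) arr cnt N v m
      = (pvPairs (arr.length : Int)).foldl
          (fun st ij => recurA f (pvSwap arr ij.1 ij.2) (cnt + 1) N st.1 st.2)
          (PySem.Set.add v (cv, cnt), m) := by
  rw [recurA.eq_def, hpv]; simp only [if_neg hmem, if_neg hc]
  exact recurA_loop_eq f arr cnt N _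

theorem recurB_none (f : Nat) (N : Int) (cur : List Int) (c : Int)
    (rest : List (List Int × Int)) (v : List (Int × Int)) (m : Int)
    (hpv : pvJoinVal cur = none) :
    recurB (f + 1) N ((cur, c) :: rest) v m = recurB f N rest v m := by
  simp only [recurB, hpv]

theorem recurB_mem (f : Nat) (N : Int) (cur : List Int) (c : Int)
    (rest : List (List Int × Int)) (v : List (Int × Int)) (m : Int)
    (cv : Int) (hpv : pvJoinVal cur = some cv) (hmem : (cv, c) ∈ v) :
    recurB (f + 1) N ((cur, c) :: rest) v m = recurB f N rest v m := by
  simp only [recurB, hpv]; simp [hmem]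

theorem recurB_hit (f : Nat) (N : Int) (cur : List Int) (c : Int)
    (rest : List (List Int × Int)) (v : List (Int × Int)) (m : Int)
    (cv : Int) (hpv : pvJoinVal cur = some cv) (hmem : (cv, c) ∉ v) (hc : c = N) :
    recurB (f + 1) N ((cur, c) :: rest) v m
      = recurB f N rest (PySem.Set.add v (cv, c)) (max m cv) := by
  subst hc; simp only [recurB, hpv]; simp [hmem]

theorem recurB_go (f : Nat) (N : Int) (cur : List Int) (c : Int)
    (rest : List (List Int × Int)) (v : List (Int × Int)) (m : Int)
    (cv : Int) (hpv : pvJoinVal cur = some cv) (hmem : (cv, c) ∉ v) (hc : c ≠ N) :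
    recurB (f + 1) N ((cur, c) :: rest) v m
      = recurB f N (pvSuccs cur c ++ rest) (PySem.Set.add v (cv, c)) m := by
  simp only [recurB, hpv]; simp [hmem, hc]

-- one-step simulation: processing one state on B's stack with enough fuel equals running A
-- on that state and continuing with the rest of the stack, with a bound on the fuel used
theorem pv_sim (N : Int) :
    ∀ (fA : Nat) (arr : List Int) (cnt : Int) (visited : List (Int × Int)) (max_value : Int),
      (cnt ≤ N ∨ arr.length ≤ 1) → fA = (N - cnt).toNat →
      ∃ c : Nat, c ≤ ((pvPairs (arr.length : Int)).length + 1) ^ (fA + 1) ∧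
        ∀ (rest : List (List Int × Int)) (f : Nat),
          recurB (c + f) N ((arr, cnt) :: rest) visited max_value
            = recurB f N rest (recurA fA arr cnt N visited max_value).1
                (recurA fA arr cnt N visited max_value).2 := by
  intro fA
  induction fA with
  | zero =>
    intro arr cnt visited max_value hd hf
    have h1 : (1 : Nat) ≤ ((pvPairs (arr.length : Int)).length + 1) ^ (0 + 1) :=
      Nat.one_le_pow _ _ (by omega)
    cases hpv : pvJoinVal arr with
    | none =>
      exact ⟨1, h1, fun rest f => by
        rw [Nat.add_comm, recurB_none _ _ _ _ _ _ _ hpv, recurA_none _ _ _ _ _ _ hpv]⟩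
    | some cv =>
      by_cases hmem : (cv, cnt) ∈ visited
      · exact ⟨1, h1, fun rest f => by
          rw [Nat.add_comm, recurB_mem _ _ _ _ _ _ _ _ hpv hmem,
            recurA_mem _ _ _ _ _ _ _ hpv hmem]⟩
      · by_cases hcN : cnt = N
        · exact ⟨1, h1, fun rest f => by
            rw [Nat.add_comm, recurB_hit _ _ _ _ _ _ _ _ hpv hmem hcN,
              recurA_hit _ _ _ _ _ _ _ hpv hmem hcN]⟩
        · -- fuel 0 with cnt ≠ N is only reached when len(arr) ≤ 1: no successors exist
          have hlen : arr.length ≤ 1 := by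
            rcases hd with h | h
            · exfalso; omega
            · exact h
          have hs : pvSuccs arr cnt = [] := by
            rw [pvSuccs_eq, pvPairs_nil _ (by exact_mod_cast hlen)]; rfl
          exact ⟨1, h1, fun rest f => by
            rw [Nat.add_comm, recurB_go _ _ _ _ _ _ _ _ hpv hmem hcN,
              recurA_zero _ _ _ _ _ _ hpv hmem hcN, hs, List.nil_append]⟩
  | succ fA ih =>
    intro arr cnt visited max_value hd hf
    have h1 : (1 : Nat) ≤ ((pvPairs (arr.length : Int)).length + 1) ^ (fA + 1 + 1) :=
      Nat.one_le_pow _ _ (by omega)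
    cases hpv : pvJoinVal arr with
    | none =>
      exact ⟨1, h1, fun rest f => by
        rw [Nat.add_comm, recurB_none _ _ _ _ _ _ _ hpv, recurA_none _ _ _ _ _ _ hpv]⟩
    | some cv =>
      by_cases hmem : (cv, cnt) ∈ visited
      · exact ⟨1, h1, fun rest f => by
          rw [Nat.add_comm, recurB_mem _ _ _ _ _ _ _ _ hpv hmem,
            recurA_mem _ _ _ _ _ _ _ hpv hmem]⟩
      · by_cases hcN : cnt = N
        · exact ⟨1, h1, fun rest f => by
            rw [Nat.add_comm, recurB_hit _ _ _ _ _ _ _ _ hpv hmem hcN,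
              recurA_hit _ _ _ _ _ _ _ hpv hmem hcN]⟩
        · by_cases hlen : arr.length ≤ 1
          · have hs : pvSuccs arr cnt = [] := by
              rw [pvSuccs_eq, pvPairs_nil _ (by exact_mod_cast hlen)]; rfl
            have hp : pvPairs (arr.length : Int) = [] := pvPairs_nil _ (by exact_mod_cast hlen)
            exact ⟨1, h1, fun rest f => by
              rw [Nat.add_comm, recurB_go _ _ _ _ _ _ _ _ hpv hmem hcN,
                recurA_succ _ _ _ _ _ _ _ hpv hmem hcN, hs, hp, List.nil_append,
                List.foldl_nil]⟩
          · -- the real recursion step: cnt < N, fold the children through the stack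
            have hcnt : cnt ≤ N := hd.resolve_right hlen
            have hlt : cnt < N := lt_of_le_of_ne hcnt hcN
            set K := ((pvPairs (arr.length : Int)).length + 1) ^ (fA + 1) with hK
            have hK1 : 1 ≤ K := Nat.one_le_pow _ _ (by omega)
            have loop : ∀ (ps : List (Int × Int)) (v : List (Int × Int)) (m : Int),
                ∃ c : Nat, c ≤ ps.length * K ∧
                  ∀ (rest : List (List Int × Int)) (f : Nat),
                    recurB (c + f) N
                        (ps.map (fun ij => (pvSwap arr ij.1 ij.2, cnt + 1)) ++ rest) v m
                      = recurB f N rest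
                          (ps.foldl (fun st ij =>
                            recurA fA (pvSwap arr ij.1 ij.2) (cnt + 1) N st.1 st.2) (v, m)).1
                          (ps.foldl (fun st ij =>
                            recurA fA (pvSwap arr ij.1 ij.2) (cnt + 1) N st.1 st.2) (v, m)).2 := by
              intro ps
              induction ps with
              | nil => intro v m; exact ⟨0, by simp, fun rest f => by simp⟩
              | cons ij tl ihl =>
                intro v m
                have hchild := ih (pvSwap arr ij.1 ij.2) (cnt + 1) v m
                  (Or.inl (by omega)) (by omega)
                rw [pvSwap_length] at hchild
                obtain ⟨c1, hc1, hs1⟩ := hchild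
                obtain ⟨c2, hc2, hs2⟩ :=
                  ihl (recurA fA (pvSwap arr ij.1 ij.2) (cnt + 1) N v m).1
                    (recurA fA (pvSwap arr ij.1 ij.2) (cnt + 1) N v m).2
                refine ⟨c1 + c2, ?_, ?_⟩
                · calc c1 + c2 ≤ K + tl.length * K := Nat.add_le_add hc1 hc2
                    _ = (tl.length + 1) * K := by ring
                    _ = (ij :: tl).length * K := by simp
                · intro rest f
                  have h1' := hs1 (tl.map (fun ij => (pvSwap arr ij.1 ij.2, cnt + 1)) ++ rest)
                    (c2 + f)
                  simp only [List.map_cons, List.cons_append] at h1' ⊢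
                  rw [Nat.add_assoc, h1', hs2, List.foldl_cons]
            obtain ⟨c, hc, hs⟩ := loop (pvPairs (arr.length : Int))
              (PySem.Set.add visited (cv, cnt)) max_value
            refine ⟨1 + c, ?_, ?_⟩
            · calc 1 + c ≤ K + (pvPairs (arr.length : Int)).length * K :=
                  Nat.add_le_add hK1 hc
                _ = ((pvPairs (arr.length : Int)).length + 1) * K := by ring
                _ = ((pvPairs (arr.length : Int)).length + 1) ^ (fA + 1 + 1) := by
                    rw [hK, ← pow_succ']
            · intro rest f
              have hadd : 1 + c + f = (c + f) + 1 := by omega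
              rw [hadd, recurB_go _ _ _ _ _ _ _ _ hpv hmem hcN,
                recurA_succ _ _ _ _ _ _ _ hpv hmem hcN, pvSuccs_eq, hs]

-- ===== VERDICT (by name: the statement is the Claim_ definition above) =====
theorem recur_spec : Claim_equal_recur := by
  intro arr cnt N visited max_value _hdom hpre
  unfold Spec_recur recur recur_alt
  have hd : cnt ≤ N ∨ arr.length ≤ 1 := by
    rcases hpre.2.2.1 with h | h | h
    · exact Or.inl (le_of_eq h)
    · exact Or.inr (le_of_eq h)
    · exact Or.inl (le_of_lt h.1)
  obtain ⟨c, hc, hs⟩ := pv_sim N ((N - cnt).toNat) arr cnt visited max_value hd rfl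
  have hcF : c ≤ (if (pvPairs (arr.length : Int)).length = 0 then 1
      else ((pvPairs (arr.length : Int)).length + 1) ^ ((N - cnt).toNat + 1)) := by
    by_cases h0 : (pvPairs (arr.length : Int)).length = 0
    · rw [h0] at hc; simpa [h0] using hc
    · simpa [h0] using hc
  have hF : (if (pvPairs (arr.length : Int)).length = 0 then 1
      else ((pvPairs (arr.length : Int)).length + 1) ^ ((N - cnt).toNat + 1))
      = c + ((if (pvPairs (arr.length : Int)).length = 0 then 1
      else ((pvPairs (arr.length : Int)).length + 1) ^ ((N - cnt).toNat + 1)) - c) := by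
    omega
  rw [hF, hs [] _, recurB_nil]
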